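-- pv_equiv track=rewrite | github.com/jordissm/PDG2021Plus | check_decays.py | _ascii_digits_to_subscripts_after_letter
-- ===== SOURCE A (Python) =====
-- from typing import Dict, List, Set, Tuple, Optional
-- from typing import Dict, List, Set, Tuple, Optional
--
-- _ASCII_TO_SUB = str.maketrans("0123456789", "₀₁₂₃₄₅₆₇₈₉")
--
-- def _ascii_digits_to_subscripts_after_letter(s: str) -> str:
--     """convert ASCII digits to subscripts only when immediately after a letter (K1→K₁; (1270) unchanged)."""
--     out: List[str] = []
--     i, n = 0, len(s)
--     while i < n:
--         ch = s[i]
--         out.append(ch); i += 1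
--         if ch.isalpha() and i < n and s[i].isdigit():
--             j = i
--             while j < n and s[j].isdigit():
--                 out.append(s[j].translate(_ASCII_TO_SUB))
--                 j += 1
--             i = j
--     return "".join(out)
-- ===== SOURCE B (Python) =====
-- _ASCII_TO_SUB = str.maketrans("0123456789", "\u2080\u2081\u2082\u2083\u2084\u2085\u2086\u2087\u2088\u2089")
--
-- def _ascii_digits_to_subscripts_after_letter(s: str) -> str:
--     """Flat single-pass state machine: one boolean flag instead of index bookkeeping and a nested while."""
--     out = []
--     active = False
--     for ch in s:
--         if ch.isdigit():
--             out.append(ch.translate(_ASCII_TO_SUB) if active else ch)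
--         else:
--             out.append(ch)
--             active = ch.isalpha()
--     return "".join(out)
-- ===== Notes on version B (the rewrite author's own statement) =====
-- stated objective: simpler
-- what changed: Replaced the index-based outer while loop with a nested digit-consuming inner while by a flat single pass over the characters maintaining one boolean flag (last non-digit char was a letter).
import Mathlib
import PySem

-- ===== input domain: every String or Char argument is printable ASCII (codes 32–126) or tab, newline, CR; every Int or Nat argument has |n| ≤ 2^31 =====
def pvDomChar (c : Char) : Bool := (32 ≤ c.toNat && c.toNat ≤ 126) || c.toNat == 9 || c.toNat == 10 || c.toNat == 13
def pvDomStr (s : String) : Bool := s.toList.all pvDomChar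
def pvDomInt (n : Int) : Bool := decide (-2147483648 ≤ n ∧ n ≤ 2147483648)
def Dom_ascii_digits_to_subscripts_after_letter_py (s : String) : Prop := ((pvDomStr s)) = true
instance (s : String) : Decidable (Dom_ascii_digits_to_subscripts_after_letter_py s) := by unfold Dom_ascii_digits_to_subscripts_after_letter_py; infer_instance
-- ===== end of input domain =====

-- B changes only the control structure (flat single-pass state machine instead of an
-- index-based loop with a nested digit-consuming while); same output on the ASCII domain.

-- ch.translate(_ASCII_TO_SUB): maps '0'..'9' to U+2080..U+2089, leaves anything else alone
def pvSubChar (c : Char) : Char :=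
  if c.isDigit then Char.ofNat (0x2080 + (c.toNat - 48)) else c

-- ===== PORT A =====
-- A's outer while over index i, transliterated as recursion on the remaining suffix;
-- the inner 'while j < n and s[j].isdigit()' run is the takeWhile/dropWhile split of that suffix.
def pvALoop : List Char → List Char
  | [] => []
  | ch :: rest =>
    if ch.isAlpha && (match rest with | d :: _ => d.isDigit | [] => false) then
      ch :: ((rest.takeWhile (fun c => c.isDigit)).map pvSubChar
              ++ pvALoop (rest.dropWhile (fun c => c.isDigit)))
    else
      ch :: pvALoop rest
  termination_by l => l.length
  decreasing_by
    · have := List.length_dropWhile_le (p := fun c : Char => c.isDigit) (l := rest)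
      simp; omega
    · simp

def ascii_digits_to_subscripts_after_letter_py (s : String) : String :=
  String.ofList (pvALoop s.toList)

-- ===== PORT B =====
-- for ch in s with one boolean 'active'
def pvBLoop (active : Bool) : List Char → List Char
  | [] => []
  | ch :: rest =>
    if ch.isDigit then
      (if active then pvSubChar ch else ch) :: pvBLoop active rest
    else
      ch :: pvBLoop ch.isAlpha rest

def ascii_digits_to_subscripts_after_letter_py_alt (s : String) : String :=
  String.ofList (pvBLoop false s.toList)

-- ===== PRECONDITION & SPEC =====
def Spec_ascii_digits_to_subscripts_after_letter_py (s : String) (out : String) : Prop := out = ascii_digits_to_subscripts_after_letter_py_alt s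
instance (s : String) (out : String) : Decidable (Spec_ascii_digits_to_subscripts_after_letter_py s out) := by unfold Spec_ascii_digits_to_subscripts_after_letter_py; infer_instance

-- ===== CLAIM (what is proved, stated in full; the proofs are below) =====
def Claim_equal_ascii_digits_to_subscripts_after_letter_py : Prop := ∀ (s : String), Dom_ascii_digits_to_subscripts_after_letter_py s → Spec_ascii_digits_to_subscripts_after_letter_py s (ascii_digits_to_subscripts_after_letter_py s)

-- ===== LEMMAS AND PROOFS =====

-- an ASCII letter is not an ASCII digit
theorem pv_alpha_not_digit (c : Char) (h : c.isAlpha = true) : c.isDigit = false := by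
  have eA : ('A').val.toNat = 65 := by decide
  have eZ : ('Z').val.toNat = 90 := by decide
  have ea : ('a').val.toNat = 97 := by decide
  have ez : ('z').val.toNat = 122 := by decide
  have e0 : ('0').val.toNat = 48 := by decide
  have e9 : ('9').val.toNat = 57 := by decide
  simp only [Char.isAlpha, Char.isUpper, Char.isLower, Char.isDigit, Bool.or_eq_true,
    Bool.and_eq_true, decide_eq_true_eq, Bool.and_eq_false_iff, decide_eq_false_iff_not] at *
  rcases h with ⟨h1, h2⟩ | ⟨h1, h2⟩ <;>
    simp only [ge_iff_le, UInt32.le_iff_toNat_le] at * <;> right <;> intro h3 <;> omega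

-- B's flag is irrelevant when the next char is not a digit (or the list is empty)
theorem pvBLoop_indep (a b : Bool) : ∀ (l : List Char),
    (l = [] ∨ ∀ c ∈ l.head?, ¬ c.isDigit) → pvBLoop a l = pvBLoop b l := by
  intro l h
  cases l with
  | nil => rfl
  | cons c rest =>
    rcases h with h | h
    · simp at h
    · have hc : ¬ c.isDigit := by simpa using h c
      simp [pvBLoop, hc]

-- while active, a digit run is translated elementwise
theorem pvBLoop_digits (ds : List Char) (rest : List Char)
    (h : ∀ d ∈ ds, d.isDigit) :
    pvBLoop true (ds ++ rest) = ds.map pvSubChar ++ pvBLoop true rest := by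
  induction ds with
  | nil => simp
  | cons d ds ih =>
    have hd : d.isDigit := h d (by simp)
    simp [pvBLoop, hd, ih (fun x hx => h x (by simp [hx]))]

theorem pvALoop_eq_pvBLoop : ∀ (l : List Char), pvALoop l = pvBLoop false l := by
  intro l
  induction l using pvALoop.induct with
  | case1 => rw [pvALoop]; rfl
  | case2 ch rest hcond ih =>
    simp only [Bool.and_eq_true] at hcond
    obtain ⟨ha, hd⟩ := hcond
    cases rest with
    | nil => simp at hd
    | cons d rest' =>
      simp only at hd
      rw [pvALoop]
      rw [if_pos (by simp [ha, hd])]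
      have hsplit : d :: rest' =
          (d :: rest').takeWhile (fun c => c.isDigit)
            ++ (d :: rest').dropWhile (fun c => c.isDigit) :=
        (List.takeWhile_append_dropWhile).symm
      have hdigits : ∀ c ∈ (d :: rest').takeWhile (fun c => c.isDigit), c.isDigit := by
        intro c hc
        simpa using List.mem_takeWhile_imp hc
      have hhead : ((d :: rest').dropWhile (fun c => c.isDigit)) = []
          ∨ ∀ c ∈ ((d :: rest').dropWhile (fun c => c.isDigit)).head?, ¬ c.isDigit := by
        cases hdw : (d :: rest').dropWhile (fun c => c.isDigit) with
        | nil => exact Or.inl rfl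
        | cons x xs =>
          right
          intro c hc
          simp only [List.head?_cons, Option.mem_some_iff] at hc
          subst hc
          have := List.head?_dropWhile_not (p := fun c : Char => c.isDigit) (l := d :: rest')
          rw [hdw] at this
          simpa using this
      calc ch :: (((d :: rest').takeWhile (fun c => c.isDigit)).map pvSubChar
              ++ pvALoop ((d :: rest').dropWhile (fun c => c.isDigit)))
          = ch :: (((d :: rest').takeWhile (fun c => c.isDigit)).map pvSubChar
              ++ pvBLoop true ((d :: rest').dropWhile (fun c => c.isDigit))) := by
            rw [ih, pvBLoop_indep false true _ hhead]
        _ = ch :: pvBLoop true ((d :: rest').takeWhile (fun c => c.isDigit)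
              ++ (d :: rest').dropWhile (fun c => c.isDigit)) := by
            rw [pvBLoop_digits _ _ hdigits]
        _ = ch :: pvBLoop true (d :: rest') := by rw [← hsplit]
        _ = pvBLoop false (ch :: d :: rest') := by
            simp [pvBLoop, pv_alpha_not_digit ch ha, ha]
  | case3 ch rest hcond ih =>
    rw [pvALoop.eq_def]
    dsimp only
    rw [if_neg (by simp [hcond])]
    by_cases hd : ch.isDigit
    · simp [pvBLoop, hd, ih]
    · -- ch is not a digit; B sets active := ch.isAlpha, but then rest's head is not a digit
      -- whenever ch.isAlpha (the A-condition failed), so the flag does not matter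
      rw [ih]
      by_cases ha : ch.isAlpha
      · have hrest : rest = [] ∨ ∀ c ∈ rest.head?, ¬ c.isDigit := by
          cases rest with
          | nil => exact Or.inl rfl
          | cons x xs =>
            right
            intro c hc
            simp only [List.head?_cons, Option.mem_some_iff] at hc
            subst hc
            intro hdig
            exact hcond (by simp [ha, hdig])
        simp [pvBLoop, hd, ha, pvBLoop_indep true false rest hrest]
      · simp [pvBLoop, hd, ha]

-- ===== VERDICT (by name: the statement is the Claim_ definition above) =====
theorem ascii_digits_to_subscripts_after_letter_py_spec : Claim_equal_ascii_digits_to_subscripts_after_letter_py := by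
  intro s _
  unfold Spec_ascii_digits_to_subscripts_after_letter_py
      ascii_digits_to_subscripts_after_letter_py
      ascii_digits_to_subscripts_after_letter_py_alt
  rw [pvALoop_eq_pvBLoop]
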